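-- pv_equiv track=rewrite | github.com/dglezg7/VMMR | Examples/TOI-216_2-1/vmmr.py | vResArgCoefficients
-- ===== SOURCE A (Python) =====
-- def vResArgCoefficients(iResOrder, j, cResType = "ecc"): # j is the numerator of the Orbital Period Ratio
--     # cResType = <"ecc" | "inc" > # Chooses either eccentricity or inclination resonances.
--     aaResArgCoeffs = []
--     for i1 in range(iResOrder + 1):
--         for i2 in range(iResOrder + 1):
--             if i1 + i2 == iResOrder:
--                 if cResType == "ecc":
--                     aiResArgCoeffs = [j, iResOrder - j]
--                     aiResArgCoeffs.append(-i1)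
--                     aiResArgCoeffs.append(-i2)
--                     aiResArgCoeffs.append(0)
--                     aiResArgCoeffs.append(0)
--                     aaResArgCoeffs.append(aiResArgCoeffs)
--                 if cResType == "inc":
--                     aiResArgCoeffs = [j, iResOrder - j]
--                     aiResArgCoeffs.append(0)
--                     aiResArgCoeffs.append(0)
--                     aiResArgCoeffs.append(-i1)
--                     aiResArgCoeffs.append(-i2)
--                     aaResArgCoeffs.append(aiResArgCoeffs)
--                 break
--     return aaResArgCoeffs
-- ===== SOURCE B (Python) =====
-- def vResArgCoefficients(iResOrder, j, cResType = "ecc"):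
--     # B: one pass, i2 = iResOrder - i1 computed directly (no inner scan).
--     if cResType == "ecc":
--         return [[j, iResOrder - j, -i1, -(iResOrder - i1), 0, 0]
--                 for i1 in range(iResOrder + 1)]
--     if cResType == "inc":
--         return [[j, iResOrder - j, 0, 0, -i1, -(iResOrder - i1)]
--                 for i1 in range(iResOrder + 1)]
--     return []
-- ===== Notes on version B (the rewrite author's own statement) =====
-- stated objective: faster
-- what changed: Replaced the nested range scan that searches for i2 with i1+i2==iResOrder by a single comprehension computing i2 = iResOrder - i1 directly, with the unknown-cResType case returning [] up front.
import Mathlib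
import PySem

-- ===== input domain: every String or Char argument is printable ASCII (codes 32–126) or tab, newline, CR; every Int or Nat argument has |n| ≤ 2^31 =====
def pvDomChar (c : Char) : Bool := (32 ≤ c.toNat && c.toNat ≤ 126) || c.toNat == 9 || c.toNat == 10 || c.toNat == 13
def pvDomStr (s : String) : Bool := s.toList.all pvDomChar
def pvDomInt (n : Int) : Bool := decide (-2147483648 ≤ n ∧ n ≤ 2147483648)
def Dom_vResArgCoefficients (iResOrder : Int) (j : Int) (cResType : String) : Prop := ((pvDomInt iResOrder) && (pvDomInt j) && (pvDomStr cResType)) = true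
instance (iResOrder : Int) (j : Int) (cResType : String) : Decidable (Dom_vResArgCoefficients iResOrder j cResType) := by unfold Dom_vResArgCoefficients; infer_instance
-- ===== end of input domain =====

-- B replaces A's nested range scan (inner search for i2 with i1+i2==iResOrder) by one
-- pass computing i2 = iResOrder - i1 directly (objective: faster, O(n) vs O(n^2)).

-- ===== PORT A =====
-- Inner 'for i2 in range(...)' loop of A, with its 'break': recurses over the remaining
-- i2 values, stops (returns the accumulator) as soon as i1 + i2 == iResOrder.
def vraInner (iResOrder j : Int) (cResType : String) (i1 : Int)
    (acc : List (List Int)) : List Int → List (List Int)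
  | [] => acc
  | i2 :: rest =>
      if i1 + i2 = iResOrder then
        -- body at the match, then 'break'
        let acc1 := if cResType = "ecc" then
          acc ++ [[j, iResOrder - j] ++ [-i1] ++ [-i2] ++ [0] ++ [0]] else acc
        let acc2 := if cResType = "inc" then
          acc1 ++ [[j, iResOrder - j] ++ [0] ++ [0] ++ [-i1] ++ [-i2]] else acc1
        acc2
      else vraInner iResOrder j cResType i1 acc rest

def vResArgCoefficients (iResOrder : Int) (j : Int) (cResType : String) : List (List Int) :=
  (PySem.List.pyRange 0 (iResOrder + 1) 1).foldl
    (fun acc i1 => vraInner iResOrder j cResType i1 acc (PySem.List.pyRange 0 (iResOrder + 1) 1))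
    []

-- ===== PORT B =====
def vResArgCoefficients_alt (iResOrder : Int) (j : Int) (cResType : String) : List (List Int) :=
  if cResType = "ecc" then
    (PySem.List.pyRange 0 (iResOrder + 1) 1).map
      (fun i1 => [j, iResOrder - j, -i1, -(iResOrder - i1), 0, 0])
  else if cResType = "inc" then
    (PySem.List.pyRange 0 (iResOrder + 1) 1).map
      (fun i1 => [j, iResOrder - j, 0, 0, -i1, -(iResOrder - i1)])
  else []

-- ===== PRECONDITION & SPEC =====
def Spec_vResArgCoefficients (iResOrder : Int) (j : Int) (cResType : String) (out : List (List Int)) : Prop := out = vResArgCoefficients_alt iResOrder j cResType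
instance (iResOrder : Int) (j : Int) (cResType : String) (out : List (List Int)) : Decidable (Spec_vResArgCoefficients iResOrder j cResType out) := by unfold Spec_vResArgCoefficients; infer_instance

-- ===== CLAIM (what is proved, stated in full; the proofs are below) =====
def Claim_equal_vResArgCoefficients : Prop := ∀ (iResOrder : Int) (j : Int) (cResType : String), Dom_vResArgCoefficients iResOrder j cResType → Spec_vResArgCoefficients iResOrder j cResType (vResArgCoefficients iResOrder j cResType)

-- ===== LEMMAS AND PROOFS =====

-- what one outer-loop step of A appends (empty for cResType ∉ {"ecc","inc"})
def vraRows (iResOrder j : Int) (cResType : String) (i1 : Int) : List (List Int) :=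
  (if cResType = "ecc" then [[j, iResOrder - j, -i1, -(iResOrder - i1), 0, 0]] else []) ++
  (if cResType = "inc" then [[j, iResOrder - j, 0, 0, -i1, -(iResOrder - i1)]] else [])

theorem vraInner_match (iResOrder j : Int) (c : String) (i1 : Int) (acc : List (List Int))
    (l1 l2 : List Int) (h1 : ∀ x ∈ l1, i1 + x ≠ iResOrder) :
    vraInner iResOrder j c i1 acc (l1 ++ (iResOrder - i1) :: l2)
      = acc ++ vraRows iResOrder j c i1 := by
  induction l1 with
  | nil =>
      simp only [List.nil_append, vraInner]
      rw [if_pos (by omega)]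
      unfold vraRows
      by_cases he : c = "ecc"
      · subst he; simp
      · by_cases hi : c = "inc"
        · subst hi; simp
        · simp [he, hi]
  | cons a t ih =>
      simp only [List.cons_append, vraInner]
      rw [if_neg (h1 a (by simp))]
      exact ih (fun x hx => h1 x (by simp [hx]))

theorem vraInner_pyRange (iResOrder j : Int) (c : String) (i1 : Int) (acc : List (List Int))
    (h0 : 0 ≤ i1) (h1 : i1 ≤ iResOrder) :
    vraInner iResOrder j c i1 acc (PySem.List.pyRange 0 (iResOrder + 1) 1)
      = acc ++ vraRows iResOrder j c i1 := by
  rw [PySem.List.pyRange_one_append 0 (iResOrder - i1) (iResOrder + 1) (by omega) (by omega)]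
  rw [PySem.List.pyRange_one_cons (a := iResOrder - i1) (b := iResOrder + 1) (by omega)]
  exact vraInner_match iResOrder j c i1 acc _ _
    (fun x hx => by
      have := (PySem.List.mem_pyRange_one.mp hx).2
      omega)

theorem pvFlatMapSingle {α β : Type} (f : α → β) (l : List α) :
    l.flatMap (fun x => [f x]) = l.map f := by
  induction l with
  | nil => rfl
  | cons a t ih => simp [ih]

theorem pvFlatMapNil {α β : Type} (l : List α) :
    l.flatMap (fun _ => ([] : List β)) = [] := by
  induction l with
  | nil => rfl
  | cons a t ih => simp [ih]

theorem vResArgCoefficients_spec' (iResOrder j : Int) (c : String) :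
    vResArgCoefficients iResOrder j c = vResArgCoefficients_alt iResOrder j c := by
  unfold vResArgCoefficients vResArgCoefficients_alt
  rw [PySem.List.foldl_congr_mem _ _ (fun acc i1 => acc ++ vraRows iResOrder j c i1) _
      (fun acc x hx => vraInner_pyRange iResOrder j c x acc
        (PySem.List.mem_pyRange_one.mp hx).1
        (by have := (PySem.List.mem_pyRange_one.mp hx).2; omega)),
    PySem.List.foldl_append_eq_flatMap]
  by_cases he : c = "ecc"
  · subst he
    have h : vraRows iResOrder j "ecc"
        = fun i1 => [[j, iResOrder - j, -i1, -(iResOrder - i1), 0, 0]] := by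
      funext i1; simp [vraRows]
    simp [h, pvFlatMapSingle]
  · by_cases hi : c = "inc"
    · subst hi
      have h : vraRows iResOrder j "inc"
          = fun i1 => [[j, iResOrder - j, 0, 0, -i1, -(iResOrder - i1)]] := by
        funext i1; simp [vraRows]
      simp [h, pvFlatMapSingle, he]
    · have h : vraRows iResOrder j c = fun _ => ([] : List (List Int)) := by
        funext i1; simp [vraRows, he, hi]
      simp [h, pvFlatMapNil, he, hi]

-- ===== VERDICT (by name: the statement is the Claim_ definition above) =====
theorem vResArgCoefficients_spec : Claim_equal_vResArgCoefficients := by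
  intro iResOrder j c _
  exact vResArgCoefficients_spec' iResOrder j c
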